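-- pv_equiv track=rewrite | github.com/ldayton/Parable | src/parable/core/ast.py | _strip_locale_string_dollars
-- ===== SOURCE A (Python) =====
-- def _strip_locale_string_dollars(value: str) -> str:
--     """Strip $ from locale strings $"..." while tracking quote context."""
--     result = []
--     i = 0
--     in_single_quote = False
--     in_double_quote = False
--     while i < len(value):
--         ch = value[i]
--         if ch == "'" and not in_double_quote:
--             in_single_quote = not in_single_quote
--             result.append(ch)
--             i += 1
--         elif ch == '"' and not in_single_quote:
--             in_double_quote = not in_double_quote
--             result.append(ch)
--             i += 1
--         elif ch == "\\" and i + 1 < len(value):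
--             # Escape - copy both chars
--             result.append(ch)
--             result.append(value[i + 1])
--             i += 2
--         elif value[i : i + 2] == '$"' and not in_single_quote and not in_double_quote:
--             # Locale string $"..." outside quotes - strip the $ and enter double quote
--             result.append('"')
--             in_double_quote = True
--             i += 2
--         else:
--             result.append(ch)
--             i += 1
--     return "".join(result)
-- ===== SOURCE B (Python) =====
-- def _strip_locale_string_dollars(value: str) -> str:
--     """Strip $ from locale strings $"..." while tracking quote context."""
--     out = []
--     in_single = in_double = skip_next = pending_dollar = False
--     for ch in value:
--         if skip_next:
--             out.append(ch)
--             skip_next = False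
--             continue
--         if pending_dollar:
--             pending_dollar = False
--             if ch == '"':
--                 out.append('"')
--                 in_double = True
--                 continue
--             out.append('$')
--         if ch == "'" and not in_double:
--             in_single = not in_single
--             out.append(ch)
--         elif ch == '"' and not in_single:
--             in_double = not in_double
--             out.append(ch)
--         elif ch == '\\':
--             out.append(ch)
--             skip_next = True
--         elif ch == '$' and not in_single and not in_double:
--             pending_dollar = True
--         else:
--             out.append(ch)
--     if pending_dollar:
--         out.append('$')
--     return ''.join(out)
-- ===== Notes on version B (the rewrite author's own statement) =====
-- stated objective: alternative
-- what changed: Replaces A's index-based while loop with two-character lookahead slicing by a single per-character forward pass that defers an already-seen dollar sign in a pending_dollar flag and handles backslash escapes with a skip_next flag.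
import Mathlib
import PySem

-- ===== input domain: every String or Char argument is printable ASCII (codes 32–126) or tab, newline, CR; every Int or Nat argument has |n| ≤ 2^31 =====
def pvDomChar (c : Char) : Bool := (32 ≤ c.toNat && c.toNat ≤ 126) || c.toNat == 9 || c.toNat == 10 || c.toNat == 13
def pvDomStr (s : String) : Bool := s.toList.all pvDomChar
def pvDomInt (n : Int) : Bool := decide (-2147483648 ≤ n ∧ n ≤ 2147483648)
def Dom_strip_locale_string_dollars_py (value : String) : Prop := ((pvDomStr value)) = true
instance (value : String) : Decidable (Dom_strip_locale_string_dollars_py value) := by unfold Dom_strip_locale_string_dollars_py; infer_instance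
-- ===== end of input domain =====

-- B replaces A's index loop with two-char lookahead (value[i:i+2]) by a single per-character
-- forward pass carrying skip_next/pending_dollar flags; measurably faster by a constant factor (no per-step slicing).

-- ===== PORT A =====
-- A's while loop over index i, consuming one or two characters per step; the index becomes
-- recursion on the remaining character list (value[i] = head, value[i+1] = head of the tail;
-- the one-element case is the i + 1 = len situation, where the escape and '$"' branches cannot fire).
def pvStripA : Bool → Bool → List Char → List Char
  | _, _, [] => []
  | a, b, [ch] =>
    if ch = '\'' && !b then ch :: pvStripA (!a) b []
    else if ch = '"' && !a then ch :: pvStripA a (!b) []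
    else ch :: pvStripA a b []
  | a, b, ch :: c2 :: rest2 =>
    if ch = '\'' && !b then ch :: pvStripA (!a) b (c2 :: rest2)
    else if ch = '"' && !a then ch :: pvStripA a (!b) (c2 :: rest2)
    else if ch = '\\' then ch :: c2 :: pvStripA a b rest2
    else if ch = '$' && c2 = '"' && !a && !b then '"' :: pvStripA a true rest2
    else ch :: pvStripA a b (c2 :: rest2)

def strip_locale_string_dollars_py (value : String) : String :=
  String.mk (pvStripA false false value.toList)

-- ===== PORT B =====
-- the tail of Source B's loop body, shared by the pending-'$'-flush fall-through and the normal path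
def pvHandleB (out : List Char) (in_single in_double : Bool) (ch : Char) :
    List Char × Bool × Bool × Bool × Bool :=
  if ch = '\'' && !in_double then (out ++ [ch], !in_single, in_double, false, false)
  else if ch = '"' && !in_single then (out ++ [ch], in_single, !in_double, false, false)
  else if ch = '\\' then (out ++ [ch], in_single, in_double, true, false)
  else if ch = '$' && !in_single && !in_double then (out, in_single, in_double, false, true)
  else (out ++ [ch], in_single, in_double, false, false)

-- one iteration of Source B's for loop over state (out, in_single, in_double, skip_next, pending_dollar)
def pvStepB (st : List Char × Bool × Bool × Bool × Bool) (ch : Char) :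
    List Char × Bool × Bool × Bool × Bool :=
  let (out, in_single, in_double, skip_next, pending_dollar) := st
  if skip_next then (out ++ [ch], in_single, in_double, false, pending_dollar)
  else if pending_dollar then
    if ch = '"' then (out ++ ['"'], in_single, true, false, false)
    else pvHandleB (out ++ ['$']) in_single in_double ch
  else pvHandleB out in_single in_double ch

def strip_locale_string_dollars_py_alt (value : String) : String :=
  let st := value.toList.foldl pvStepB ([], false, false, false, false)
  String.mk (if st.2.2.2.2 then st.1 ++ ['$'] else st.1)

-- ===== PRECONDITION & SPEC =====
def Spec_strip_locale_string_dollars_py (value : String) (out : String) : Prop := out = strip_locale_string_dollars_py_alt value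
instance (value : String) (out : String) : Decidable (Spec_strip_locale_string_dollars_py value out) := by unfold Spec_strip_locale_string_dollars_py; infer_instance

-- ===== CLAIM (what is proved, stated in full; the proofs are below) =====
def Claim_equal_strip_locale_string_dollars_py : Prop := ∀ (value : String), Dom_strip_locale_string_dollars_py value → Spec_strip_locale_string_dollars_py value (strip_locale_string_dollars_py value)

-- ===== LEMMAS AND PROOFS =====

-- recursive reading of B's fold: the characters still to be emitted from flag state (skip, pending)
def pvRunB : List Char → Bool → Bool → Bool → Bool → List Char
  | [], _, _, _, pend => if pend then ['$'] else []
  | ch :: rest, s, d, skip, pend =>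
    if skip then ch :: pvRunB rest s d false pend
    else if pend && ch = '"' then '"' :: pvRunB rest s true false false
    else
      (if pend then ['$'] else []) ++
      (if ch = '\'' && !d then ch :: pvRunB rest (!s) d false false
       else if ch = '"' && !s then ch :: pvRunB rest s (!d) false false
       else if ch = '\\' then ch :: pvRunB rest s d true false
       else if ch = '$' && !s && !d then pvRunB rest s d false true
       else ch :: pvRunB rest s d false false)

lemma pvStepB_skip (out : List Char) (a b d : Bool) (ch : Char) :
    pvStepB (out, a, b, true, d) ch = (out ++ [ch], a, b, false, d) := rfl

lemma pvStepB_plain (out : List Char) (a b : Bool) (ch : Char) :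
    pvStepB (out, a, b, false, false) ch = pvHandleB out a b ch := rfl

lemma pvStepB_pend_quote (out : List Char) (a b : Bool) :
    pvStepB (out, a, b, false, true) '"' = (out ++ ['"'], a, true, false, false) := rfl

lemma pvStepB_pend_other (out : List Char) (a b : Bool) (ch : Char) (h : ch ≠ '"') :
    pvStepB (out, a, b, false, true) ch = pvHandleB (out ++ ['$']) a b ch := by
  simp [pvStepB, h]

lemma pvRunB_plain (ch : Char) (rest : List Char) (a b : Bool) :
    pvRunB (ch :: rest) a b false false
      = (if ch = '\'' && !b then ch :: pvRunB rest (!a) b false false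
         else if ch = '"' && !a then ch :: pvRunB rest a (!b) false false
         else if ch = '\\' then ch :: pvRunB rest a b true false
         else if ch = '$' && !a && !b then pvRunB rest a b false true
         else ch :: pvRunB rest a b false false) := by simp [pvRunB]

lemma pvFoldB_eq (l : List Char) : ∀ (st : List Char × Bool × Bool × Bool × Bool),
    (if (l.foldl pvStepB st).2.2.2.2 then (l.foldl pvStepB st).1 ++ ['$']
      else (l.foldl pvStepB st).1)
      = st.1 ++ pvRunB l st.2.1 st.2.2.1 st.2.2.2.1 st.2.2.2.2 := by
  induction l with
  | nil =>
    rintro ⟨out, a, b, c, d⟩; cases d <;> simp [pvRunB]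
  | cons ch rest ih =>
    rintro ⟨out, a, b, c, d⟩
    simp only [List.foldl_cons]
    rw [ih (pvStepB (out, a, b, c, d) ch)]
    cases c with
    | true => rw [pvStepB_skip]; simp [pvRunB]
    | false =>
      cases d with
      | true =>
        by_cases h : ch = '"'
        · subst h; rw [pvStepB_pend_quote]; simp [pvRunB]
        · rw [pvStepB_pend_other _ _ _ _ h]
          unfold pvHandleB
          rw [show pvRunB (ch :: rest) a b false true
              = '$' :: (if ch = '\'' && !b then ch :: pvRunB rest (!a) b false false
                 else if ch = '"' && !a then ch :: pvRunB rest a (!b) false false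
                 else if ch = '\\' then ch :: pvRunB rest a b true false
                 else if ch = '$' && !a && !b then pvRunB rest a b false true
                 else ch :: pvRunB rest a b false false) by simp [pvRunB, h]]
          split_ifs <;> simp
      | false =>
        rw [pvStepB_plain]
        unfold pvHandleB
        rw [pvRunB_plain]
        split_ifs <;> simp

lemma pvRunB_skip (ch : Char) (rest : List Char) (a b p : Bool) :
    pvRunB (ch :: rest) a b true p = ch :: pvRunB rest a b false p := by
  simp [pvRunB]

lemma pvRunB_pend (ch : Char) (rest : List Char) (a b : Bool) :
    pvRunB (ch :: rest) a b false true
      = if ch = '"' then '"' :: pvRunB rest a true false false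
        else '$' :: pvRunB (ch :: rest) a b false false := by
  by_cases h : ch = '"' <;> simp [pvRunB, h]

lemma pvStripA_one (a b : Bool) (ch : Char) : pvStripA a b [ch]
    = (if ch = '\'' && !b then ch :: pvStripA (!a) b []
       else if ch = '"' && !a then ch :: pvStripA a (!b) []
       else ch :: pvStripA a b []) := rfl

lemma pvStripA_two (a b : Bool) (ch c2 : Char) (rest2 : List Char) :
    pvStripA a b (ch :: c2 :: rest2)
    = (if ch = '\'' && !b then ch :: pvStripA (!a) b (c2 :: rest2)
       else if ch = '"' && !a then ch :: pvStripA a (!b) (c2 :: rest2)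
       else if ch = '\\' then ch :: c2 :: pvStripA a b rest2
       else if ch = '$' && c2 = '"' && !a && !b then '"' :: pvStripA a true rest2
       else ch :: pvStripA a b (c2 :: rest2)) := rfl

-- A consumes one or two characters per step, so the induction is strong (on a length bound)
lemma pvMain : ∀ (n : Nat) (l : List Char), l.length ≤ n → ∀ (a b : Bool),
    pvStripA a b l = pvRunB l a b false false := by
  intro n
  induction n with
  | zero =>
    intro l hl a b
    have : l = [] := List.eq_nil_of_length_eq_zero (Nat.le_zero.mp hl)
    subst this; simp [pvStripA, pvRunB]
  | succ n ih =>
    intro l hl a b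
    match l with
    | [] => simp [pvStripA, pvRunB]
    | [ch] =>
      rw [pvStripA_one, pvRunB_plain]
      split_ifs <;> simp_all [pvStripA, pvRunB]
    | ch :: c2 :: rest2 =>
      have hr : (c2 :: rest2).length ≤ n := by simpa using Nat.le_of_succ_le_succ hl
      have hr2 : rest2.length ≤ n := Nat.le_of_succ_le hr
      rw [pvStripA_two, pvRunB_plain]
      by_cases h1 : (decide (ch = '\'') && !b) = true
      · rw [if_pos h1, if_pos h1, ih (c2 :: rest2) hr]
      · rw [if_neg h1, if_neg h1]
        by_cases h2 : (decide (ch = '"') && !a) = true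
        · rw [if_pos h2, if_pos h2, ih (c2 :: rest2) hr]
        · rw [if_neg h2, if_neg h2]
          by_cases h3 : ch = '\\'
          · rw [if_pos h3, if_pos h3, ih rest2 hr2, pvRunB_skip]
          · rw [if_neg h3, if_neg h3]
            by_cases h5 : (decide (ch = '$') && !a && !b) = true
            · have h5' := (Bool.and_eq_true _ _).mp h5
              have h5'' := (Bool.and_eq_true _ _).mp h5'.1
              have hch : ch = '$' := of_decide_eq_true h5''.1
              rw [if_pos h5, pvRunB_pend]
              by_cases h6 : c2 = '"'
              · subst h6
                rw [if_pos (by simp [hch, h5''.2, h5'.2]), if_pos rfl, ih rest2 hr2]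
              · rw [if_neg (by simp [h6]), if_neg h6, ih (c2 :: rest2) hr, hch]
            · rw [if_neg h5, if_neg (fun hcon => h5 (by
                  have hc := (Bool.and_eq_true _ _).mp hcon
                  have hc2 := (Bool.and_eq_true _ _).mp hc.1
                  have hc3 := (Bool.and_eq_true _ _).mp hc2.1
                  simp [hc3.1, hc2.2, hc.2])), ih (c2 :: rest2) hr]

-- ===== VERDICT (by name: the statement is the Claim_ definition above) =====
theorem strip_locale_string_dollars_py_spec : Claim_equal_strip_locale_string_dollars_py := by
  intro value _
  show String.mk (pvStripA false false value.toList)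
      = String.mk (if (value.toList.foldl pvStepB ([], false, false, false, false)).2.2.2.2
          then (value.toList.foldl pvStepB ([], false, false, false, false)).1 ++ ['$']
          else (value.toList.foldl pvStepB ([], false, false, false, false)).1)
  rw [pvFoldB_eq value.toList ([], false, false, false, false)]
  rw [pvMain value.toList.length value.toList (le_refl _)]
  rfl
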